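-- pv_equiv track=rewrite | github.com/fmoeran/chess.py | engine/magics.py | map_index
-- ===== SOURCE A (Python) =====
-- def map_index(index, mask):
--     """
--     returns an index for a specific mask in relation to a position's view.
--     used for indexing every possible set of positions from the view of a square
--     """
--     # we do this by imagining we map every position of the index num (max 12 bits)
--     # to the mask's bits and then return that mask
--
--     result = 0
--     while index:  # while we still have a bit left in our index
--         # set the current mask to the next 1 bit of the mask
--         current_mask_bitset = mask & (~mask+1)
--         # if the last bit == 1, we should set our new mask's position to 1
--         if index % 2 == 1:
--             result |= current_mask_bitset
--         # remove this bit from the mask, we have used it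
--         mask &= ~current_mask_bitset
--         index >>= 1
--     return result
-- ===== SOURCE B (Python) =====
-- def map_index(index, mask):
--     """
--     returns an index for a specific mask in relation to a position's view.
--     used for indexing every possible set of positions from the view of a square
--     """
--     # scan bit positions j of mask upward with an explicit position counter;
--     # consume one bit of index at each set position of mask
--     result = 0
--     j = 0
--     while index and (mask >> j):
--         bit = (mask >> j) & 1
--         result |= (index & bit) << j
--         index >>= bit
--         j += 1
--     return result
-- ===== Notes on version B (the rewrite author's own statement) =====
-- stated objective: alternative
-- what changed: A walks index bit-by-bit, each step isolating mask's lowest set bit with mask & (~mask+1) and stripping it from mask; B never uses the x&-x trick: it scans mask's bit positions upward with a position counter, tests each bit by shift-and-mask, and consumes one index bit only at set positions, stopping when either index or the remaining mask shifts to zero.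
import Mathlib
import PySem

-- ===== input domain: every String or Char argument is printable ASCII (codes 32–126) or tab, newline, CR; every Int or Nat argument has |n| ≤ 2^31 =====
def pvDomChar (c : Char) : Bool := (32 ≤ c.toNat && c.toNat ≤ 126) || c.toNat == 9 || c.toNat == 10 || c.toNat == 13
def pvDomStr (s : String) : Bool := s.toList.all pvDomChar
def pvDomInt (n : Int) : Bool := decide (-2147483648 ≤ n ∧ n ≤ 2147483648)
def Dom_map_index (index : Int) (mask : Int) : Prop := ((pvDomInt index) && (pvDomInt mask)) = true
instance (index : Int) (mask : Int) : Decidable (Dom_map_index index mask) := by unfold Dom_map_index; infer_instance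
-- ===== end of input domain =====

-- B replaces A's index-driven loop (which isolates mask's lowest set bit with mask & -mask and
-- strips it each step) by an upward scan over mask's bit POSITIONS that shifts and tests bits,
-- consuming one index bit per set mask position; equivalence is claimed for index ≥ 0
-- (A's 'while index' loops forever on a negative index).

-- ===== PORT A =====
-- termination fact for the while-loop: 'index >>= 1' shrinks a positive index
theorem pvShiftHalf (index : Int) : index >>> (1:Nat) = index / 2 := by
  rw [Int.shiftRight_eq_div_pow]; norm_num

def mapIndexLoop (index mask result : Int) : Int :=
  if index = 0 then result          -- while index:
  else if h : 0 < index then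
    -- current_mask_bitset = mask & (~mask+1)
    let cur := PySem.Int.band mask (Int.not mask + 1)
    -- if index % 2 == 1: result |= cur
    let result' := if PySem.Int.mod index 2 = 1 then PySem.Int.bor result cur else result
    -- mask &= ~cur; index >>= 1
    mapIndexLoop (index >>> (1:Nat)) (PySem.Int.band mask (Int.not cur)) result'
  else result                       -- Python does not terminate here (index < 0); outside Pre_
termination_by index.toNat
decreasing_by simp only [pvShiftHalf]; omega

def map_index (index : Int) (mask : Int) : Int :=
  mapIndexLoop index mask 0

-- ===== PORT B =====
-- floor division: x / b = -1 for -b ≤ x < 0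
theorem pvNegDiv (x b : Int) (hb : 0 < b) (h1 : -b ≤ x) (h2 : x < 0) : x / b = -1 :=
  ((Int.ediv_emod_unique (a := x) (b := b) (q := -1) (r := x + b) hb).mpr
    ⟨by ring, by omega, by omega⟩).1

-- termination fact for B's scan: while 'mask >> j' is nonzero but its low bit is 0,
-- j is still below mask's bit length
theorem pv_j_lt (mask : Int) (j : Nat) (h1 : mask >>> j ≠ 0)
    (h2 : PySem.Int.band (mask >>> j) 1 = 0) : j < PySem.Int.bitLength mask := by
  by_contra h
  have hle : PySem.Int.bitLength mask ≤ j := by omega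
  have habs := PySem.Int.lt_two_pow_bitLength mask
  have hpow : (mask.natAbs : Int) < (2:Int) ^ j := by
    have h2le := Nat.pow_le_pow_right (by norm_num : 1 ≤ 2) hle
    exact_mod_cast lt_of_lt_of_le habs h2le
  rw [Int.shiftRight_eq_div_pow] at h1 h2
  push_cast at h1 h2
  by_cases hm0 : 0 ≤ mask
  · exact h1 (Int.ediv_eq_zero_of_lt hm0 (by omega))
  · have hdiv : mask / (2:Int) ^ j = -1 :=
      pvNegDiv mask ((2:Int) ^ j) (by positivity) (by omega) (by omega)
    rw [hdiv] at h2
    have : PySem.Int.band (-1) 1 = 1 := by decide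
    omega

-- while index and (mask >> j):  bit = (mask >> j) & 1;  result |= (index & bit) << j;
--                               index >>= bit;  j += 1
def altLoop (index mask : Int) (j : Nat) (result : Int) : Int :=
  if hc : index ≠ 0 ∧ mask >>> j ≠ 0 then
    if h : 0 ≤ index then
      let bit := PySem.Int.band (mask >>> j) 1
      altLoop (index >>> bit.toNat) mask (j + 1)
        (PySem.Int.bor result (PySem.Int.band index bit <<< j))
    else result                     -- Python B does not terminate here (index < 0, mask < 0); outside Pre_
  else result
termination_by index.natAbs + (PySem.Int.bitLength mask - j)
decreasing_by
  rcases hc with ⟨hi, hm⟩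
  have hb := PySem.Int.band_one (mask >>> j)
  have h0 := PySem.Int.mod_nonneg (mask >>> j) (b := 2) (by norm_num)
  have h1 := PySem.Int.mod_lt (mask >>> j) (b := 2) (by norm_num)
  by_cases hz : PySem.Int.band (mask >>> j) 1 = 0
  · have hlt := pv_j_lt mask j hm hz
    simp only [hz, Int.toNat_zero, Int.shiftRight_zero]
    omega
  · have hbit : PySem.Int.band (mask >>> j) 1 = 1 := by omega
    have hh : index >>> (1:Nat) = index / 2 := pvShiftHalf index
    simp only [hbit, Int.toNat_one]
    omega

def map_index_alt (index : Int) (mask : Int) : Int :=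
  altLoop index mask 0 0

-- ===== PRECONDITION & SPEC =====
-- Pre_ excludes index < 0: there A's 'while index' never terminates (index >>= 1 stalls at -1).
def Pre_map_index (index : Int) (mask : Int) : Prop := 0 ≤ index
instance (index : Int) (mask : Int) : Decidable (Pre_map_index index mask) := by unfold Pre_map_index; infer_instance
def pvWitness_map_index : Int × Int := (11, 38)

def Spec_map_index (index : Int) (mask : Int) (out : Int) : Prop := out = map_index_alt index mask
instance (index : Int) (mask : Int) (out : Int) : Decidable (Spec_map_index index mask out) := by unfold Spec_map_index; infer_instance

-- ===== CLAIM (what is proved, stated in full; the proofs are below) =====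
def Claim_equal_map_index : Prop := ∀ (index : Int) (mask : Int), Dom_map_index index mask → Pre_map_index index mask → Spec_map_index index mask (map_index index mask)

-- ===== LEMMAS AND PROOFS =====

theorem pvNotAddOne (m : Int) : Int.not m + 1 = -m := by
  cases m with
  | ofNat n => show Int.not _ + 1 = _; simp [Int.not, Int.negSucc_eq]
  | negSucc n => show Int.not _ + 1 = _; simp [Int.not, Int.negSucc_eq]

-- bit recursion for Nat &&& : low bit + halves
theorem pvNatLandRec (n m : Nat) :
    n &&& m = 2 * (n / 2 &&& m / 2) + (n % 2) * (m % 2) := by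
  apply Nat.eq_of_testBit_eq
  intro i
  have hsum : (2 * (n / 2 &&& m / 2) + (n % 2) * (m % 2)) / 2 = n / 2 &&& m / 2 := by
    have h2 : (n % 2) * (m % 2) ≤ 1 := by
      rcases Nat.mod_two_eq_zero_or_one n with h | h <;> simp [h]
      omega
    omega
  cases i with
  | zero =>
    rw [Nat.testBit_land]
    simp only [Nat.testBit_zero]
    rcases Nat.mod_two_eq_zero_or_one n with h | h <;>
      rcases Nat.mod_two_eq_zero_or_one m with h' | h' <;>
      simp [h, h']
  | succ i =>
    rw [Nat.testBit_land, Nat.testBit_succ, Nat.testBit_succ, Nat.testBit_succ, hsum,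
      ← Nat.testBit_land]

-- bit recursion for Nat ||| : low bit + halves
theorem pvNatLorRec (n m : Nat) :
    n ||| m = 2 * (n / 2 ||| m / 2) + max (n % 2) (m % 2) := by
  apply Nat.eq_of_testBit_eq
  intro i
  have hsum : (2 * (n / 2 ||| m / 2) + max (n % 2) (m % 2)) / 2 = n / 2 ||| m / 2 := by
    omega
  cases i with
  | zero =>
    rw [Nat.testBit_lor]
    simp only [Nat.testBit_zero]
    rcases Nat.mod_two_eq_zero_or_one n with h | h <;>
      rcases Nat.mod_two_eq_zero_or_one m with h' | h' <;>
      simp [h, h']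
  | succ i =>
    rw [Nat.testBit_lor, Nat.testBit_succ, Nat.testBit_succ, Nat.testBit_succ, hsum,
      ← Nat.testBit_lor]

-- bit recursion for Python's & on Int (nonnegative left argument)
theorem pvBandRecAux (a b : Int) (ha : 0 ≤ a) :
    PySem.Int.band a b = 2 * PySem.Int.band (a / 2) (b / 2) + (a % 2) * (b % 2) := by
  by_cases hb : 0 ≤ b
  · have ha2 : 0 ≤ a / 2 := by omega
    have hb2 : 0 ≤ b / 2 := by omega
    simp only [PySem.Int.band, if_pos ha, if_pos hb, if_pos ha2, if_pos hb2]
    have h1 : (a / 2).toNat = a.toNat / 2 := by omega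
    have h2 : (b / 2).toNat = b.toNat / 2 := by omega
    rw [h1, h2]
    have hu := pvNatLandRec a.toNat b.toNat
    rcases Nat.mod_two_eq_zero_or_one a.toNat with hn | hn <;>
      rcases Nat.mod_two_eq_zero_or_one b.toNat with hm | hm <;>
      rw [hn, hm] at hu <;>
      [ (have hA : a % 2 = 0 := by omega);
        (have hA : a % 2 = 0 := by omega);
        (have hA : a % 2 = 1 := by omega);
        (have hA : a % 2 = 1 := by omega)] <;>
      [ (have hB : b % 2 = 0 := by omega);
        (have hB : b % 2 = 1 := by omega);
        (have hB : b % 2 = 0 := by omega);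
        (have hB : b % 2 = 1 := by omega)] <;>
      rw [hA, hB] <;> omega
  · have ha2 : 0 ≤ a / 2 := by omega
    have hb2 : ¬ 0 ≤ b / 2 := by omega
    simp only [PySem.Int.band, if_pos ha, if_neg (by omega : ¬ 0 ≤ b), if_pos ha2, if_neg hb2]
    have h1 : (a / 2).toNat = a.toNat / 2 := by omega
    have h2 : (-(b / 2) - 1).toNat = (-b - 1).toNat / 2 := by omega
    rw [h1, h2]
    have hu := pvNatLandRec a.toNat (-b - 1).toNat
    have hle : a.toNat &&& (-b - 1).toNat ≤ a.toNat := Nat.and_le_left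
    have hle2 : a.toNat / 2 &&& (-b - 1).toNat / 2 ≤ a.toNat / 2 := Nat.and_le_left
    rcases Nat.mod_two_eq_zero_or_one a.toNat with hn | hn <;>
      rcases Nat.mod_two_eq_zero_or_one (-b - 1).toNat with hm | hm <;>
      rw [hn, hm] at hu <;>
      [ (have hA : a % 2 = 0 := by omega);
        (have hA : a % 2 = 0 := by omega);
        (have hA : a % 2 = 1 := by omega);
        (have hA : a % 2 = 1 := by omega)] <;>
      [ (have hB : b % 2 = 1 := by omega);
        (have hB : b % 2 = 0 := by omega);
        (have hB : b % 2 = 1 := by omega);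
        (have hB : b % 2 = 0 := by omega)] <;>
      rw [hA, hB] <;> omega

-- bit recursion for Python's & on Int: low bit + floor-halves
theorem pvBandRec (a b : Int) :
    PySem.Int.band a b = 2 * PySem.Int.band (a / 2) (b / 2) + (a % 2) * (b % 2) := by
  by_cases ha : 0 ≤ a
  · exact pvBandRecAux a b ha
  by_cases hb : 0 ≤ b
  · rw [PySem.Int.band_comm, PySem.Int.band_comm (a / 2), pvBandRecAux b a hb]; ring
  · have ha2 : ¬ 0 ≤ a / 2 := by omega
    have hb2 : ¬ 0 ≤ b / 2 := by omega
    simp only [PySem.Int.band, if_neg (by omega : ¬ 0 ≤ a), if_neg (by omega : ¬ 0 ≤ b),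
      if_neg ha2, if_neg hb2]
    have h1 : (-(a / 2) - 1).toNat = (-a - 1).toNat / 2 := by omega
    have h2 : (-(b / 2) - 1).toNat = (-b - 1).toNat / 2 := by omega
    rw [h1, h2]
    have hu := pvNatLorRec (-a - 1).toNat (-b - 1).toNat
    rcases Nat.mod_two_eq_zero_or_one (-a - 1).toNat with hn | hn <;>
      rcases Nat.mod_two_eq_zero_or_one (-b - 1).toNat with hm | hm <;>
      rw [hn, hm] at hu <;>
      [ (have hA : a % 2 = 1 := by omega);
        (have hA : a % 2 = 1 := by omega);
        (have hA : a % 2 = 0 := by omega);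
        (have hA : a % 2 = 0 := by omega)] <;>
      [ (have hB : b % 2 = 1 := by omega);
        (have hB : b % 2 = 0 := by omega);
        (have hB : b % 2 = 1 := by omega);
        (have hB : b % 2 = 0 := by omega)] <;>
      rw [hA, hB] <;> omega

theorem pvBandEvenEven (x y : Int) :
    PySem.Int.band (2 * x) (2 * y) = 2 * PySem.Int.band x y := by
  have h := pvBandRec (2 * x) (2 * y)
  have hx : 2 * x / 2 = x := by omega
  have hy : 2 * y / 2 = y := by omega
  have hx2 : 2 * x % 2 = 0 := by omega
  rw [hx, hy, hx2, zero_mul] at h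
  omega

theorem pvBandEvenOdd (x y : Int) :
    PySem.Int.band (2 * x) (2 * y + 1) = 2 * PySem.Int.band x y := by
  have h := pvBandRec (2 * x) (2 * y + 1)
  have hx : 2 * x / 2 = x := by omega
  have hy : (2 * y + 1) / 2 = y := by omega
  have hx2 : 2 * x % 2 = 0 := by omega
  rw [hx, hy, hx2, zero_mul] at h
  omega

-- any a & ~a = 0
theorem pvBandNotSelf (a : Int) : PySem.Int.band a (Int.not a) = 0 := by
  have hnot : Int.not a = -a - 1 := by have := pvNotAddOne a; omega
  rw [hnot]
  by_cases ha : 0 ≤ a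
  · have hb : ¬ 0 ≤ -a - 1 := by omega
    simp only [PySem.Int.band, if_pos ha, if_neg hb]
    have h : (-(-a - 1) - 1).toNat = a.toNat := by omega
    rw [h, Nat.and_self]
    simp
  · have hb : 0 ≤ -a - 1 := by omega
    simp only [PySem.Int.band, if_neg ha, if_pos hb]
    have h : (-a - 1).toNat &&& (-a - 1).toNat = (-a - 1).toNat := Nat.and_self _
    rw [h]
    simp

-- for odd q, q & -q = 1
theorem pvOddBandNeg (q : Int) (hq : q % 2 = 1) : PySem.Int.band q (-q) = 1 := by
  have h := pvBandRec q (-q)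
  have h1 : (-q) / 2 = -(q / 2) - 1 := by omega
  have h2 : (-q) % 2 = 1 := by omega
  rw [h1, h2, hq] at h
  have h3 : -(q / 2) - 1 = Int.not (q / 2) := by have := pvNotAddOne (q / 2); omega
  rw [h3, pvBandNotSelf] at h
  omega

-- lowest set bit of q·2^j for odd q is 2^j
theorem pvShiftA (j : Nat) (q : Int) (hq : q % 2 = 1) :
    PySem.Int.band (q * 2 ^ j) (-(q * 2 ^ j)) = 2 ^ j := by
  induction j with
  | zero => simpa using pvOddBandNeg q hq
  | succ j ih =>
    have h1 : q * 2 ^ (j + 1) = 2 * (q * 2 ^ j) := by ring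
    rw [h1, show -(2 * (q * 2 ^ j)) = 2 * (-(q * 2 ^ j)) by ring, pvBandEvenEven, ih]
    ring

-- clearing bit j of q·2^j for odd q gives (q-1)·2^j
theorem pvShiftB (j : Nat) (q : Int) (hq : q % 2 = 1) :
    PySem.Int.band (q * 2 ^ j) (Int.not (2 ^ j)) = (q - 1) * 2 ^ j := by
  induction j with
  | zero =>
    have hn : Int.not (1:Int) = -2 := by decide
    have h := pvBandRec q (-2)
    rw [show ((-2:Int) / 2) = -1 by decide, show ((-2:Int) % 2) = 0 by decide,
      PySem.Int.band_neg_one, mul_zero] at h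
    simp only [pow_zero, mul_one, hn]
    omega
  | succ j ih =>
    have h1 : q * 2 ^ (j + 1) = 2 * (q * 2 ^ j) := by ring
    have hn : Int.not ((2:Int) ^ (j + 1)) = 2 * Int.not ((2:Int) ^ j) + 1 := by
      have ha : Int.not ((2:Int) ^ (j + 1)) = -(2 ^ (j + 1)) - 1 := by
        rw [← pvNotAddOne ((2:Int) ^ (j + 1))]; ring
      have hb : Int.not ((2:Int) ^ j) = -(2 ^ j) - 1 := by
        rw [← pvNotAddOne ((2:Int) ^ j)]; ring
      rw [ha, hb]; ring
    rw [h1, hn, pvBandEvenOdd, ih]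
    ring

-- A's loop on a zero mask: strips index and returns result unchanged
theorem pvAZero : ∀ (N : Nat) (index result : Int), 0 ≤ index → index.natAbs ≤ N →
    mapIndexLoop index 0 result = result := by
  intro N
  induction N with
  | zero =>
    intro index result h0 hN
    have : index = 0 := by omega
    subst this
    rw [mapIndexLoop]; simp
  | succ N ih =>
    intro index result h0 hN
    rw [mapIndexLoop]
    by_cases hz : index = 0
    · simp [hz]
    · have hpos : 0 < index := by omega
      simp only [hz, if_false, dif_pos hpos]
      rw [pvNotAddOne]
      have hc : PySem.Int.band 0 (-(0:Int)) = 0 := by decide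
      have hm : PySem.Int.band 0 (Int.not 0) = 0 := by decide
      rw [hc, hm]
      have hh : index >>> (1:Nat) = index / 2 := pvShiftHalf index
      have := ih (index >>> (1:Nat)) (if PySem.Int.mod index 2 = 1 then PySem.Int.bor result 0 else result) (by omega) (by omega)
      rw [this]
      split_ifs with h <;> simp [PySem.Int.bor_zero]

-- clearing mask's bits below j+1, as a function of mask's bits cleared below j
theorem pvMaskStep (mask : Int) (j : Nat) :
    (mask >>> (j+1)) <<< (j+1) = ((mask >>> j) / 2) * 2 ^ (j+1) := by
  rw [Int.shiftLeft_eq, Int.shiftRight_eq_div_pow, Int.shiftRight_eq_div_pow]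
  push_cast
  rw [pow_succ, Int.ediv_ediv_of_nonneg (by positivity)]

-- main invariant: B at position j equals A run on mask with its bits below j cleared
theorem pvLoopEq (mask : Int) : ∀ (N : Nat) (index : Int) (j : Nat) (result : Int),
    0 ≤ index → index.natAbs + (PySem.Int.bitLength mask - j) ≤ N →
    altLoop index mask j result = mapIndexLoop index ((mask >>> j) <<< j) result := by
  intro N
  induction N with
  | zero =>
    intro index j result h0 hN
    have hi : index = 0 := by omega
    subst hi
    rw [altLoop, mapIndexLoop]
    simp
  | succ N ih =>
    intro index j result h0 hN
    by_cases hz : index = 0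
    · subst hz
      rw [altLoop, mapIndexLoop]
      simp
    by_cases hq0 : mask >>> j = 0
    · rw [altLoop, dif_neg (by simp [hq0]), hq0]
      have hsh : (0:Int) <<< j = 0 := by rw [Int.shiftLeft_eq]; ring
      rw [hsh, pvAZero index.natAbs index result h0 le_rfl]
    · have hpos : 0 < index := by omega
      rw [altLoop, dif_pos ⟨hz, hq0⟩, dif_pos h0]
      have hsh0 : (0:Int) <<< j = 0 := by rw [Int.shiftLeft_eq]; ring
      have hb1 : PySem.Int.band (mask >>> j) 1 = (mask >>> j) % 2 := by
        rw [PySem.Int.band_one, PySem.Int.mod_eq_emod_of_pos (by norm_num)]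
      rcases (by omega : (mask >>> j) % 2 = 0 ∨ (mask >>> j) % 2 = 1) with hpar | hpar
      · -- mask bit j is 0: B skips the position, A's state is unchanged
        have hjlt : j < PySem.Int.bitLength mask := pv_j_lt mask j hq0 (by rw [hb1, hpar])
        simp only [hb1, hpar, Int.toNat_zero, Int.shiftRight_zero, PySem.Int.band_zero]
        rw [hsh0, PySem.Int.bor_zero]
        rw [ih index (j+1) result h0 (by omega)]
        congr 1
        rw [pvMaskStep, Int.shiftLeft_eq, pow_succ]
        have h2 : mask >>> j = 2 * ((mask >>> j) / 2) := by omega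
        calc (mask >>> j) / 2 * (2 ^ j * 2) = 2 * ((mask >>> j) / 2) * 2 ^ j := by ring
          _ = (mask >>> j) * 2 ^ j := by rw [← h2]
      · -- mask bit j is 1: one step of A, consuming one index bit
        have hhalf : index >>> (1:Nat) = index / 2 := pvShiftHalf index
        simp only [hb1, hpar, Int.toNat_one]
        rw [mapIndexLoop, if_neg hz, dif_pos hpos, pvNotAddOne]
        have hM : (mask >>> j) <<< j = (mask >>> j) * 2 ^ j := Int.shiftLeft_eq _ _
        rw [hM, pvShiftA j (mask >>> j) hpar]
        show altLoop (index >>> (1:Nat)) mask (j + 1) (PySem.Int.bor result (PySem.Int.band index 1 <<< j)) =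
          mapIndexLoop (index >>> (1:Nat)) (PySem.Int.band (mask >>> j * 2 ^ j) (Int.not (2 ^ j)))
            (if PySem.Int.mod index 2 = 1 then PySem.Int.bor result (2 ^ j) else result)
        rw [pvShiftB j (mask >>> j) hpar]
        have hmask' : (mask >>> j - 1) * 2 ^ j = (mask >>> (j+1)) <<< (j+1) := by
          rw [pvMaskStep, pow_succ]
          have h2 : mask >>> j - 1 = 2 * ((mask >>> j) / 2) := by omega
          calc (mask >>> j - 1) * 2 ^ j = 2 * ((mask >>> j) / 2) * 2 ^ j := by rw [h2]
            _ = (mask >>> j) / 2 * (2 ^ j * 2) := by ring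
        rw [hmask']
        have hmod : PySem.Int.mod index 2 = index % 2 := PySem.Int.mod_eq_emod_of_pos (by norm_num)
        have hbi : PySem.Int.band index 1 = index % 2 := by rw [PySem.Int.band_one, hmod]
        have hN' : (index >>> (1:Nat)).natAbs + (PySem.Int.bitLength mask - (j+1)) ≤ N := by
          rw [hhalf]; omega
        rcases (by omega : index % 2 = 0 ∨ index % 2 = 1) with hip | hip
        · rw [hbi, hip, hsh0, PySem.Int.bor_zero,
            if_neg (by rw [hmod, hip]; norm_num)]
          exact ih (index >>> (1:Nat)) (j+1) result (by rw [hhalf]; omega) hN'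
        · rw [hbi, hip, if_pos (by rw [hmod, hip])]
          have hone : (1:Int) <<< j = 2 ^ j := by rw [Int.shiftLeft_eq]; ring
          rw [hone]
          exact ih (index >>> (1:Nat)) (j+1) (PySem.Int.bor result (2 ^ j)) (by rw [hhalf]; omega) hN'

-- ===== VERDICT (by name: the statement is the Claim_ definition above) =====
theorem map_index_spec : Claim_equal_map_index := by
  intro index mask _hDom hPre
  unfold Spec_map_index map_index map_index_alt
  have h := pvLoopEq mask (index.natAbs + PySem.Int.bitLength mask) index 0 0 hPre (by omega)
  rw [h, Int.shiftRight_zero]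
  norm_num [Int.shiftLeft_eq]
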